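-- pv_equiv track=rewrite | github.com/pobiedimska/datascience | KoretsOleksandr/recursion.py | recursin_func
-- ===== SOURCE A (Python) =====
-- def recursin_func(dataset, help_var):
--     '''
--         рекурсія виводить скільки видів древ в бронксі
--     :param dataset:
--     :param help_var:
--     :return:
--     '''
--
--     if len(dataset)>=1:
--         if 'Bronx' in list(dataset.keys()):
--             help_var = help_var + 1
--             dataset.pop(list(dataset.keys())[0])
--             return recursin_func(dataset, help_var)
--         else:
--             dataset.pop(list(dataset.keys())[0])
--             return recursin_func(dataset, help_var)
--     return help_var
-- ===== SOURCE B (Python) =====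
-- def recursin_func(dataset, help_var):
--     # Closed form: 'Bronx' stays in the dict until it becomes the front key,
--     # so the counter is incremented once per key up to and including 'Bronx'.
--     keys = list(dataset.keys())
--     if 'Bronx' in keys:
--         help_var = help_var + keys.index('Bronx') + 1
--     dataset.clear()  # A empties the dict; keep the same side effect
--     return help_var
-- ===== Notes on version B (the rewrite author's own statement) =====
-- stated objective: faster
-- what changed: Replaces the key-by-key recursive pop loop with a closed form: help_var plus index('Bronx')+1 if present (then one dict.clear() to keep A's emptying side effect).
import Mathlib
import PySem

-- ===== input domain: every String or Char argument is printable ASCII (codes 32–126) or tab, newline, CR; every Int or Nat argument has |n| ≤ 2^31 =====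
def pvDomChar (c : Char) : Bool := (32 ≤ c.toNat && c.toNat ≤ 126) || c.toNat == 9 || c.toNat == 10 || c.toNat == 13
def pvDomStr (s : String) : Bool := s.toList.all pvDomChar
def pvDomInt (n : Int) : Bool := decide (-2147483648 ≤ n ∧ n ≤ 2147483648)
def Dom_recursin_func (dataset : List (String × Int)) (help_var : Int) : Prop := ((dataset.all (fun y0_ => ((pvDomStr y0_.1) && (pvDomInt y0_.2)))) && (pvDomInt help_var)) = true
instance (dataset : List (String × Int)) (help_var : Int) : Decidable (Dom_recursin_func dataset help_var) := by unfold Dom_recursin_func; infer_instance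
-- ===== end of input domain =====

-- B replaces A's pop-one-key-per-recursive-call loop by the closed form
-- help_var + index('Bronx')+1 (if present). Equivalence is about the RETURN
-- value only; A empties the dict in place (Source B mirrors that with one clear()).

-- ===== PORT A =====
-- A recurses on the dict: while nonempty, increment if 'Bronx' is still a key,
-- then pop the first key (= drop the head item, keys being unique) and recurse.
def recursin_func_loop : List (String × Int) → Int → Int
  | [], help_var => help_var
  | p :: rest, help_var =>
      if "Bronx" ∈ (p :: rest).map Prod.fst then
        recursin_func_loop rest (help_var + 1)
      else
        recursin_func_loop rest help_var

def recursin_func (dataset : List (String × Int)) (help_var : Int) : Int :=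
  recursin_func_loop (PySem.Dict.ofList dataset).items help_var

-- ===== PORT B =====
-- keys = list(dataset.keys()); if 'Bronx' in keys: help_var += keys.index('Bronx') + 1
def recursin_func_alt (dataset : List (String × Int)) (help_var : Int) : Int :=
  let keys := (PySem.Dict.ofList dataset).keys
  match PySem.List.index? keys "Bronx" with
  | some i => help_var + (i : Int) + 1
  | none => help_var

-- ===== PRECONDITION & SPEC =====
def Spec_recursin_func (dataset : List (String × Int)) (help_var : Int) (out : Int) : Prop := out = recursin_func_alt dataset help_var
instance (dataset : List (String × Int)) (help_var : Int) (out : Int) : Decidable (Spec_recursin_func dataset help_var out) := by unfold Spec_recursin_func; infer_instance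

-- ===== CLAIM (what is proved, stated in full; the proofs are below) =====
def Claim_equal_recursin_func : Prop := ∀ (dataset : List (String × Int)) (help_var : Int), Dom_recursin_func dataset help_var → Spec_recursin_func dataset help_var (recursin_func dataset help_var)

-- ===== LEMMAS AND PROOFS =====

-- On an items list with unique keys, A's loop computes B's closed form.
lemma recursin_func_loop_eq (L : List (String × Int)) (h : Int)
    (hnd : (L.map Prod.fst).Nodup) :
    recursin_func_loop L h =
      match PySem.List.index? (L.map Prod.fst) "Bronx" with
      | some i => h + (i : Int) + 1
      | none => h := by
  induction L generalizing h with
  | nil => simp [recursin_func_loop, PySem.List.index?]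
  | cons p rest ih =>
    simp only [List.map_cons, List.nodup_cons] at hnd
    obtain ⟨hnotin, hrest⟩ := hnd
    rw [recursin_func_loop]
    simp only [List.map_cons]
    by_cases hp : p.1 = "Bronx"
    · have hbn : "Bronx" ∉ rest.map Prod.fst := hp ▸ hnotin
      have hidx : PySem.List.index? (rest.map Prod.fst) "Bronx" = none :=
        (PySem.List.index?_eq_none_iff _ _).mpr hbn
      rw [if_pos (by simp [hp]), ih _ hrest, hidx, hp,
        PySem.List.index?_cons_self]
      simp
    · have hne : p.1 ≠ "Bronx" := hp
      rw [PySem.List.index?_cons_of_ne (rest.map Prod.fst) hne]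
      by_cases hb : "Bronx" ∈ rest.map Prod.fst
      · rw [if_pos (by simp [hb]), ih _ hrest]
        obtain ⟨i, hi⟩ := Option.isSome_iff_exists.mp
          ((PySem.List.index?_isSome_iff _ _).mpr hb)
        rw [hi]
        simp only [Option.map_some]
        push_cast
        ring
      · rw [if_neg (by simp [hb, Ne.symm hne]), ih _ hrest,
          (PySem.List.index?_eq_none_iff _ _).mpr hb]
        simp

-- ===== VERDICT (by name: the statement is the Claim_ definition above) =====
theorem recursin_func_spec : Claim_equal_recursin_func := by
  intro dataset help_var _
  unfold Spec_recursin_func recursin_func recursin_func_alt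
  have hnd : ((PySem.Dict.ofList dataset).items.map Prod.fst).Nodup := by
    have := PySem.Dict.nodup_keys_ofList (κ := String) (ν := Int) dataset
    simpa [PySem.Dict.keys] using this
  rw [recursin_func_loop_eq _ _ hnd]
  simp [PySem.Dict.keys]
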